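-- pv_equiv track=rewrite | github.com/dictation-toolbox/natlink | src/natlinkcore/nsformat.py | formatPassword
-- ===== SOURCE A (Python) =====
-- countDict= dict(one=1, two=2, three=3, four=4, five=5, six=6, seven=7, eight=8, nine=9,
--                 een=1, twee=2, drie=3, vier=4, vijf=5, zes=6, zeven=7, acht=8, negen=9)
--
-- def formatPassword(wordList):
--     """format the words, no spaces capping each word, getting the numbers and repeating the @ etc
-- >>> formatPassword(['small', 'bird', 'three', '@'])
-- 'SmallBird3@@@'
--
--     """
--     nextRepeat = 0
--     outList = []
--     for w in wordList:
--         if nextRepeat: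
--             while nextRepeat:
--                 outList.append(w)
--                 nextRepeat -= 1
--         elif w in countDict:
--             nextRepeat = countDict[w]
--             outList.append(str(nextRepeat))
--         else:
--             outList.append(w.capitalize())
--     return ''.join(outList)
-- ===== SOURCE B (Python) =====
-- countDict= dict(one=1, two=2, three=3, four=4, five=5, six=6, seven=7, eight=8, nine=9,
--                 een=1, twee=2, drie=3, vier=4, vijf=5, zes=6, zeven=7, acht=8, negen=9)
--
-- def formatPassword(wordList):
--     parts = []
--     i = 0
--     while i < len(wordList):
--         w = wordList[i]
--         if w in countDict:
--             n = countDict[w]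
--             parts.append(str(n))
--             if i + 1 < len(wordList):
--                 parts.append(wordList[i + 1] * n)
--                 i += 2
--             else:
--                 i += 1
--         else:
--             parts.append(w.capitalize())
--             i += 1
--     return ''.join(parts)
-- ===== Notes on version B (the rewrite author's own statement) =====
-- stated objective: simpler
-- what changed: Replaces A's state machine with a carried nextRepeat counter (and its inner while-loop drain on the next iteration) by a stateless index-based lookahead loop that, at a number word, emits the digit and consumes the following word as a single repeated string via `w * n`.
import Mathlib
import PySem

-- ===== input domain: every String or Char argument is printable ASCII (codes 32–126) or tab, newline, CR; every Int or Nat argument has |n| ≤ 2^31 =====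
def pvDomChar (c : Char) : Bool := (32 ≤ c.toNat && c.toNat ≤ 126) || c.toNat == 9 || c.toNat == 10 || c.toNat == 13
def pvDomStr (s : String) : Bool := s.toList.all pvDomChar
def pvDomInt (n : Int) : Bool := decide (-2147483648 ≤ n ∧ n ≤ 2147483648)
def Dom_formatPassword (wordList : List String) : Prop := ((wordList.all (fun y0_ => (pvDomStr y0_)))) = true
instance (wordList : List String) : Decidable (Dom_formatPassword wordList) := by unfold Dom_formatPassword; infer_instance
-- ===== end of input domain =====

-- ===== PORT A =====
-- B replaces A's carried nextRepeat counter with a lookahead-consume recursion; objective: simpler decomposition (not faster).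
def pvCountDict : PySem.Dict String Int := PySem.Dict.ofList
  [("one",1),("two",2),("three",3),("four",4),("five",5),("six",6),("seven",7),("eight",8),("nine",9),
   ("een",1),("twee",2),("drie",3),("vier",4),("vijf",5),("zes",6),("zeven",7),("acht",8),("negen",9)]

-- str.capitalize(), ported by hand: exact on the ASCII domain (first char upper-cased, rest lower-cased)
def pvCapitalize (s : String) : String :=
  match s.toList with
  | [] => s
  | c :: rest => String.ofList (PySem.Chars.upperChar c :: PySem.Chars.lower rest)

-- the inner 'while nextRepeat:' loop of A (counter is 1..9, kept as Nat)
def pvWhileApp (w : String) : Nat → List String → List String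
  | 0, out => out
  | n+1, out => pvWhileApp w n (out ++ [w])

-- A's for-loop, state = (nextRepeat, outList)
def pvLoopA : List String → Nat → List String → List String
  | [], _, out => out
  | w :: ws, nextRepeat, out =>
    if nextRepeat ≠ 0 then pvLoopA ws 0 (pvWhileApp w nextRepeat out)
    else match pvCountDict.get? w with
      | some n => pvLoopA ws n.toNat (out ++ [PySem.Int.toStr n])
      | none => pvLoopA ws 0 (out ++ [pvCapitalize w])

def formatPassword (wordList : List String) : String :=
  PySem.Str.join "" (pvLoopA wordList 0 [])

-- ===== PORT B =====
-- Python's w * n string repetition, ported by hand (exact)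
def pvStrMul (s : String) (n : Nat) : String :=
  String.ofList (List.replicate n s.toList).flatten

-- B's 'while i < len(wordList)' lookahead loop: consume the word after a number word raw
def pvLoopB : List String → List String
  | [] => []
  | w :: rest =>
    match pvCountDict.get? w with
    | some n =>
      PySem.Int.toStr n ::
        (match rest with
         | [] => []
         | x :: rest' => pvStrMul x n.toNat :: pvLoopB rest')
    | none => pvCapitalize w :: pvLoopB rest

def formatPassword_alt (wordList : List String) : String :=
  PySem.Str.join "" (pvLoopB wordList)

-- ===== PRECONDITION & SPEC =====
def Spec_formatPassword (wordList : List String) (out : String) : Prop := out = formatPassword_alt wordList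
instance (wordList : List String) (out : String) : Decidable (Spec_formatPassword wordList out) := by unfold Spec_formatPassword; infer_instance

-- ===== CLAIM (what is proved, stated in full; the proofs are below) =====
def Claim_equal_formatPassword : Prop := ∀ (wordList : List String), Dom_formatPassword wordList → Spec_formatPassword wordList (formatPassword wordList)

-- ===== LEMMAS AND PROOFS =====
def pvFlat (xs : List String) : List Char := (xs.map String.toList).flatten

theorem pvJoin_empty_eq_flatten (ps : List (List Char)) :
    PySem.Chars.join [] ps = ps.flatten := by
  induction ps with
  | nil => simp [PySem.Chars.join_nil]
  | cons p rest ih =>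
    cases rest with
    | nil => simp [PySem.Chars.join_singleton]
    | cons q r => simp [PySem.Chars.join_cons_cons, ih]

theorem pvWhileApp_eq (w : String) (n : Nat) (out : List String) :
    pvWhileApp w n out = out ++ List.replicate n w := by
  induction n generalizing out with
  | zero => simp [pvWhileApp]
  | succ m ih => simp [pvWhileApp, ih, List.replicate_succ]

theorem pvLoopA_acc (ws : List String) (n : Nat) (out : List String) :
    pvLoopA ws n out = out ++ pvLoopA ws n [] := by
  induction ws generalizing n out with
  | nil => simp [pvLoopA]
  | cons w rest ih =>
    simp only [pvLoopA]
    split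
    · rw [pvWhileApp_eq, pvWhileApp_eq, ih]
      conv_rhs => rw [ih]
      simp
    · cases h : pvCountDict.get? w with
      | some n' =>
        simp only [h]
        rw [ih]
        conv_rhs => rw [ih]
        simp
      | none =>
        simp only [h]
        rw [ih]
        conv_rhs => rw [ih]
        simp

theorem pvLoopA_repeat (x : String) (ws : List String) (m : Nat) (hm : m ≠ 0) :
    pvLoopA (x :: ws) m [] = List.replicate m x ++ pvLoopA ws 0 [] := by
  simp only [pvLoopA]
  rw [if_pos hm, pvWhileApp_eq, pvLoopA_acc]
  simp

theorem pvCountDict_pos (w : String) (n : Int) (h : pvCountDict.get? w = some n) : 0 < n := by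
  have hm := PySem.Dict.mem_items_of_get?_eq_some pvCountDict h
  have hall : ∀ p ∈ pvCountDict.items, 0 < p.2 := by decide
  exact hall _ hm

theorem pvMain (ws : List String) : pvFlat (pvLoopA ws 0 []) = pvFlat (pvLoopB ws) := by
  induction hn : ws.length using Nat.strong_induction_on generalizing ws with
  | _ N ih =>
  subst hn
  cases ws with
  | nil => simp [pvLoopA, pvLoopB]
  | cons w rest =>
    cases h : pvCountDict.get? w with
    | none =>
      have ihr := ih rest.length (by simp) rest rfl
      simp only [pvLoopA, pvLoopB, h]
      rw [if_neg (by simp), pvLoopA_acc]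
      simp only [pvFlat, List.map_cons, List.flatten_cons, List.map_append, List.flatten_append,
        List.nil_append, List.map_nil, List.flatten_nil] at *
      rw [ihr]
      simp
    | some n =>
      have hn0 : (0 : Int) < n := pvCountDict_pos w n h
      cases rest with
      | nil =>
        simp [pvLoopA, pvLoopB, h]
      | cons x rest' =>
        have hne : n.toNat ≠ 0 := by omega
        have hA : pvLoopA (w :: x :: rest') 0 []
            = [PySem.Int.toStr n] ++ (List.replicate n.toNat x ++ pvLoopA rest' 0 []) := by
          conv_lhs => rw [pvLoopA]
          rw [if_neg (by simp)]
          simp only [h]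
          rw [pvLoopA_acc, pvLoopA_repeat x rest' n.toNat hne]
          simp
        have ihr := ih rest'.length (by simp) rest' rfl
        simp only [pvFlat] at ihr ⊢
        rw [hA]
        simp only [pvLoopB, h, List.map_cons, List.flatten_cons, List.map_append,
          List.flatten_append, List.map_replicate]
        rw [ihr]
        simp [pvStrMul]

theorem pvJoinStr_eq_of_flat (xs ys : List String) (h : pvFlat xs = pvFlat ys) :
    PySem.Str.join "" xs = PySem.Str.join "" ys := by
  apply String.toList_inj.mp
  rw [PySem.Str.toList_join, PySem.Str.toList_join]
  have he : ("" : String).toList = [] := rfl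
  rw [he, pvJoin_empty_eq_flatten, pvJoin_empty_eq_flatten]
  exact h

-- ===== VERDICT (by name: the statement is the Claim_ definition above) =====
theorem formatPassword_spec : Claim_equal_formatPassword := by
  intro wordList _
  unfold Spec_formatPassword formatPassword formatPassword_alt
  exact pvJoinStr_eq_of_flat _ _ (pvMain wordList)
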